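-- pv_equiv track=rewrite | github.com/toniale/DSC80 | labs/lab01.py | exploded_numbers
-- ===== SOURCE A (Python) =====
-- def exploded_numbers(ints, n):
--     """
--     exploded_numbers returns a list of strings of numbers from the
--     input array each exploded by n.
--     Each integer is zero padded.
--
--     :param ints: a list of integers.
--     :param n: a non-negative integer.
--
--     :returns: a list of strings of exploded numbers.
--     :Example:
--     >>> exploded_numbers([3, 4], 2)
--     ['1 2 3 4 5', '2 3 4 5 6']
--     >>> exploded_numbers([3, 8, 15], 2)
--     ['01 02 03 04 05', '06 07 08 09 10', '13 14 15 16 17']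
--     """
--
--     #  zfill() method adds zeros (0) at the beginning of the string, until it reaches the specified length
--
--     output = []
--     digits = len(str(max(ints)))
--     for i in ints:
--         temp = str(i).zfill(digits)
--         for t in range(1, n + 1):
--             temp = str(i - t).zfill(digits) + " " + temp + " " + str(i + t).zfill(digits)
--         output.append(temp)
--     return output
-- ===== SOURCE B (Python) =====
-- def exploded_numbers(ints, n):
--     digits = len(str(max(ints)))
--     out = []
--     for i in ints:
--         window = list(range(i - n, i)) + [i] + list(range(i + 1, i + n + 1))
--         out.append(' '.join(str(k).zfill(digits) for k in window))
--     return out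
-- ===== Notes on version B (the rewrite author's own statement) =====
-- stated objective: simpler
-- what changed: Replaces the symmetric center-out string-growing loop (prepending i-t and appending i+t around a growing string) with a single left-to-right join over the explicit window list range(i-n,i)+[i]+range(i+1,i+n+1).
import Mathlib
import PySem

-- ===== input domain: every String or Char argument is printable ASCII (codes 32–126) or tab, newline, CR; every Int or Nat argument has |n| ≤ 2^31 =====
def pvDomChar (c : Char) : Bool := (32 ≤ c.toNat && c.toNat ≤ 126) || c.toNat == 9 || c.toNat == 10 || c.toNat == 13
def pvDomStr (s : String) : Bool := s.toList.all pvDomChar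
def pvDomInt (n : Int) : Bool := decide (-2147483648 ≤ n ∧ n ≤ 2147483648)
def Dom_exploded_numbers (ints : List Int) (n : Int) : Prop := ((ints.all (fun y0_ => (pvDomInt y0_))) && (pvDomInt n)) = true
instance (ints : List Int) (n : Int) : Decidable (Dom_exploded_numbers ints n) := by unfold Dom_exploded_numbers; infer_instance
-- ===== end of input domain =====

-- B replaces A's center-out symmetric string-growing loop with one left-to-right join over the explicit window list (simpler decomposition).


-- ===== PORT A =====
-- str(k).zfill(digits), on List Char (exact: PySem.Chars.zfill/Int.toChars)
def pvPad (digits : Int) (k : Int) : List Char := PySem.Chars.zfill (PySem.Int.toChars k) digits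

-- literal port of A: digits = len(str(max(ints))); for each i grow temp outward over t in range(1, n+1)
def exploded_numbers (ints : List Int) (n : Int) : List String :=
  match PySem.List.max? ints (fun x => x) with
  | none => []   -- unreachable under Pre_ (max([]) raises ValueError)
  | some m =>
    let digits : Int := (PySem.Int.toChars m).length
    ints.foldl (fun output i =>
      let temp := (PySem.List.pyRange 1 (n + 1)).foldl
        (fun temp t => pvPad digits (i - t) ++ [' '] ++ temp ++ [' '] ++ pvPad digits (i + t))
        (pvPad digits i)
      output ++ [String.mk temp]) []

-- ===== PORT B =====
-- literal port of B: window = range(i-n, i) + [i] + range(i+1, i+n+1); ' '.join of padded members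
def exploded_numbers_alt (ints : List Int) (n : Int) : List String :=
  match PySem.List.max? ints (fun x => x) with
  | none => []   -- unreachable under Pre_ (max([]) raises ValueError)
  | some m =>
    let digits : Int := (PySem.Int.toChars m).length
    ints.map (fun i =>
      String.mk (PySem.Chars.join [' ']
        ((PySem.List.pyRange (i - n) i ++ [i] ++ PySem.List.pyRange (i + 1) (i + n + 1)).map
          (pvPad digits))))

-- ===== PRECONDITION & SPEC =====
-- Pre_ excludes only empty ints, on which both A and B raise ValueError via max([]).
def Pre_exploded_numbers (ints : List Int) (n : Int) : Prop := ints ≠ []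
instance (ints : List Int) (n : Int) : Decidable (Pre_exploded_numbers ints n) := by unfold Pre_exploded_numbers; infer_instance
def pvWitness_exploded_numbers : List Int × Int := ([3, 8, 15], 2)
def Spec_exploded_numbers (ints : List Int) (n : Int) (out : List String) : Prop := out = exploded_numbers_alt ints n
instance (ints : List Int) (n : Int) (out : List String) : Decidable (Spec_exploded_numbers ints n out) := by unfold Spec_exploded_numbers; infer_instance

-- ===== CLAIM (what is proved, stated in full; the proofs are below) =====
def Claim_equal_exploded_numbers : Prop := ∀ (ints : List Int) (n : Int), Dom_exploded_numbers ints n → Pre_exploded_numbers ints n → Spec_exploded_numbers ints n (exploded_numbers ints n)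

-- ===== LEMMAS AND PROOFS =====

-- join sep (l ++ [y]) appends on the right when l is nonempty
theorem pv_join_append_singleton (sep y : List Char) (l : List (List Char)) (h : l ≠ []) :
    PySem.Chars.join sep (l ++ [y]) = PySem.Chars.join sep l ++ sep ++ y := by
  induction l with
  | nil => exact absurd rfl h
  | cons a t ih =>
    cases t with
    | nil => simp [PySem.Chars.join_singleton, PySem.Chars.join_cons_cons]
    | cons b t' =>
      have h1 : (a :: b :: t') ++ [y] = a :: ((b :: t') ++ [y]) := by simp
      have h2 : (b :: t') ++ [y] = b :: (t' ++ [y]) := by simp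
      rw [h1, h2, PySem.Chars.join_cons_cons, ← h2, ih (by simp),
          PySem.Chars.join_cons_cons]
      simp [List.append_assoc]

-- the core invariant: A's center-out fold over range(1, m+1) equals the join over the
-- contiguous window range(i-m, i+m+1), for a natural number m of steps
theorem pv_fold_eq_join (digits i : Int) (m : Nat) :
    (PySem.List.pyRange 1 ((m : Int) + 1)).foldl
        (fun temp t => pvPad digits (i - t) ++ [' '] ++ temp ++ [' '] ++ pvPad digits (i + t))
        (pvPad digits i)
      = PySem.Chars.join [' ']
          ((PySem.List.pyRange (i - (m : Int)) (i + (m : Int) + 1)).map (pvPad digits)) := by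
  induction m with
  | zero =>
    have h0 : ((0:Nat):Int) = 0 := by simp
    rw [h0, PySem.List.pyRange_one_eq_nil (by omega)]
    have h1 : i - (0:Int) = i := by ring
    have h2 : i + (0:Int) + 1 = i + 1 := by ring
    rw [h1, h2, PySem.List.pyRange_one_singleton]
    simp [PySem.Chars.join_singleton, List.foldl]
  | succ k ih =>
    push_cast
    rw [PySem.List.pyRange_one_succ_right (a := 1) (b := (k:Int) + 1) (by omega),
        List.foldl_append, ih]
    have h2 : i - ((k:Int) + 1) + 1 = i - (k:Int) := by ring
    have h3 : i + ((k:Int) + 1) + 1 = (i + (k:Int) + 1) + 1 := by ring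
    rw [PySem.List.pyRange_one_cons (a := i - ((k:Int) + 1)) (b := i + ((k:Int) + 1) + 1) (by omega),
        h2, h3, PySem.List.pyRange_one_succ_right (a := i - (k:Int)) (b := i + (k:Int) + 1) (by omega)]
    have hne : (PySem.List.pyRange (i - (k:Int)) (i + (k:Int) + 1)).map (pvPad digits) ≠ [] := by
      rw [PySem.List.pyRange_one_cons (by omega)]; simp
    rcases hx : (PySem.List.pyRange (i - (k:Int)) (i + (k:Int) + 1)).map (pvPad digits) with _ | ⟨a, t⟩
    · exact absurd hx hne
    · rw [List.map_cons, List.map_append, List.map_singleton, hx, List.cons_append,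
          PySem.Chars.join_cons_cons, ← List.cons_append,
          pv_join_append_singleton [' '] _ (a :: t) (by simp)]
      simp only [List.foldl_cons, List.foldl_nil]
      have h4 : i + ((k:Int) + 1) = i + (k:Int) + 1 := by ring
      rw [h4]
      simp [List.append_assoc]

-- per-element equality: A's inner fold = B's join over the split window, any integer n
theorem pv_elem_eq (digits i n : Int) :
    (PySem.List.pyRange 1 (n + 1)).foldl
        (fun temp t => pvPad digits (i - t) ++ [' '] ++ temp ++ [' '] ++ pvPad digits (i + t))
        (pvPad digits i)
      = PySem.Chars.join [' ']
          ((PySem.List.pyRange (i - n) i ++ [i] ++ PySem.List.pyRange (i + 1) (i + n + 1)).map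
            (pvPad digits)) := by
  by_cases hn : n ≤ 0
  case pos =>
    -- empty loop; both side ranges empty; join [pad i] = pad i
    rw [PySem.List.pyRange_one_eq_nil (a := 1) (b := n + 1) (by omega),
        PySem.List.pyRange_one_eq_nil (a := i - n) (b := i) (by omega),
        PySem.List.pyRange_one_eq_nil (a := i + 1) (b := i + n + 1) (by omega)]
    simp [PySem.Chars.join_singleton, List.foldl]
  case neg =>
    obtain ⟨m, hm⟩ : ∃ m : Nat, n = (m : Int) := ⟨n.toNat, by omega⟩
    subst hm
    rw [pv_fold_eq_join]
    congr 2
    rw [PySem.List.pyRange_one_append (i - (m:Int)) i (i + (m:Int) + 1) (by omega) (by omega),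
        PySem.List.pyRange_one_append i (i + 1) (i + (m:Int) + 1) (by omega) (by omega),
        PySem.List.pyRange_one_singleton]
    simp [List.append_assoc]

-- foldl-append accumulation is map
theorem pv_foldl_append_map {α β : Type} (g : α → β) (ints : List α) (acc : List β) :
    ints.foldl (fun output i => output ++ [g i]) acc = acc ++ ints.map g := by
  induction ints generalizing acc with
  | nil => simp
  | cons a t ih => simp [List.foldl, ih]

-- ===== VERDICT (by name: the statement is the Claim_ definition above) =====
theorem exploded_numbers_spec : Claim_equal_exploded_numbers := by
  intro ints n _ hpre
  unfold Spec_exploded_numbers exploded_numbers exploded_numbers_alt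
  rcases hmax : PySem.List.max? ints (fun x => x) with _ | m
  · rfl
  · simp only
    rw [pv_foldl_append_map (g := fun i => String.mk ((PySem.List.pyRange 1 (n + 1)).foldl
        (fun temp t => pvPad ((PySem.Int.toChars m).length : Int) (i - t) ++ [' '] ++ temp ++ [' '] ++ pvPad ((PySem.Int.toChars m).length : Int) (i + t))
        (pvPad ((PySem.Int.toChars m).length : Int) i)))]
    simp only [List.nil_append]
    apply List.map_congr_left
    intro i _
    rw [pv_elem_eq]
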